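-- pv_equiv track=rewrite | github.com/CecileGiang/ML | TME 5/tme5.py | find_all_subseqs
-- ===== SOURCE A (Python) =====
-- import itertools
--
-- def find_all_subseqs(string, length_max=2):
--     """ Renvoie la liste de toutes les sous-séquences de la chaîne de caractères
--         passée en paramètre, de taille <= length_max. Utilise la méthode
--         combinations du module itertools afin de trouver toutes les
--         combinaisons possibles d'indices.
--         @param string: str, texte dont on veut trouver toutes les sous-séquences.
--     """
--     all_inds = [ i for i in range(len(string)) ]
--     combs = []
--
--     for length in range(1, length_max + 1):
--         combs_inds = list(itertools.combinations(all_inds, length))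
--         combs_strs = list(itertools.combinations(string, length))
--         combs += [ ( ''.join(combs_strs[i]) , combs_inds[i][length - 1] - combs_inds[i][0] ) for i in range(len(combs_strs)) ]
--
--     return combs
-- ===== SOURCE B (Python) =====
-- def find_all_subseqs(string, length_max=2):
--     """Enumerate all subsequences of length <= length_max with their index span,
--     via an explicit recursive DFS over increasing index choices (no itertools)."""
--     n = len(string)
--     res = []
--
--     def dfs(start, idxs, remaining):
--         if remaining == 0:
--             res.append((''.join(string[i] for i in idxs), idxs[-1] - idxs[0]))
--         else:
--             for i in range(start, n - remaining + 1):
--                 dfs(i + 1, idxs + [i], remaining - 1)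
--
--     for length in range(1, min(length_max, n) + 1):
--         dfs(0, [], length)
--     return res
-- ===== Notes on version B (the rewrite author's own statement) =====
-- stated objective: alternative
-- what changed: Replaces the two parallel itertools.combinations materializations and index-matched list comprehension with a recursive DFS over increasing index choices that emits each (subsequence, span) pair directly, capping the length loop at len(string).
import Mathlib
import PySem

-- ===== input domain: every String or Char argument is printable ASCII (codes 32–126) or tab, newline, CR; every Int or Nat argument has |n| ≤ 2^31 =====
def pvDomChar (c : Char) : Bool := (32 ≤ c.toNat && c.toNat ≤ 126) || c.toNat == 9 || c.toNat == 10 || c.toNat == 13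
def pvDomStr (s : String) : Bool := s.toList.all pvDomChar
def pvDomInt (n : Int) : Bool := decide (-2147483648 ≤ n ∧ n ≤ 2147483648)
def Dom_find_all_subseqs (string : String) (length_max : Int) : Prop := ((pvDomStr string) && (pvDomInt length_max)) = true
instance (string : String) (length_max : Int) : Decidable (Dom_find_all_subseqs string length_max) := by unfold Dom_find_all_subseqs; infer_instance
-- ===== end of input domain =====

-- B replaces A's two parallel itertools.combinations materializations by a recursive DFS
-- over increasing index choices (alternative decomposition, same asymptotic cost).

-- ===== PORT A =====
-- itertools.combinations over a list, in itertools' lexicographic order of positions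
def pyCombinations {α : Type} : List α → Nat → List (List α)
  | _, 0 => [[]]
  | [], _ + 1 => []
  | x :: xs, n + 1 => ((pyCombinations xs n).map (fun c => x :: c)) ++ pyCombinations xs (n + 1)

def find_all_subseqs (string : String) (length_max : Int) : List (String × Int) :=
  let chars := string.toList
  let all_inds : List Int := PySem.List.pyRange 0 (chars.length : Int) 1
  (PySem.List.pyRange 1 (length_max + 1) 1).foldl (fun combs length =>
    let combs_inds := pyCombinations all_inds length.toNat
    let combs_strs := pyCombinations chars length.toNat
    combs ++ (List.range combs_strs.length).map (fun i =>
      (String.mk (combs_strs.getD i []),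
        (combs_inds.getD i []).getD (length.toNat - 1) 0 - (combs_inds.getD i []).getD 0 0))) []

-- ===== PORT B =====
-- DFS over increasing index choices; string[i] for a chosen index i is always in range,
-- so List.getD is exact here, and idxs is nonempty when remaining = 0 is reached.
def altDfs (chars : List Char) (n : Nat) : Nat → Nat → List Nat → List (String × Int)
  | 0, _start, idxs =>
      [(String.mk (idxs.map (fun i => chars.getD i ' ')),
        ((idxs.getLastD 0 : Nat) : Int) - ((idxs.headD 0 : Nat) : Int))]
  | r + 1, start, idxs =>
      (List.range' start (n - r - start)).flatMap (fun i => altDfs chars n r (i + 1) (idxs ++ [i]))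

def find_all_subseqs_alt (string : String) (length_max : Int) : List (String × Int) :=
  let chars := string.toList
  let n := chars.length
  (PySem.List.pyRange 1 (min length_max (n : Int) + 1) 1).flatMap (fun L => altDfs chars n L.toNat 0 [])

-- ===== PRECONDITION & SPEC =====
def Spec_find_all_subseqs (string : String) (length_max : Int) (out : List (String × Int)) : Prop := out = find_all_subseqs_alt string length_max
instance (string : String) (length_max : Int) (out : List (String × Int)) : Decidable (Spec_find_all_subseqs string length_max out) := by unfold Spec_find_all_subseqs; infer_instance

-- ===== CLAIM (what is proved, stated in full; the proofs are below) =====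
def Claim_equal_find_all_subseqs : Prop := ∀ (string : String) (length_max : Int), Dom_find_all_subseqs string length_max → Spec_find_all_subseqs string length_max (find_all_subseqs string length_max)

-- ===== LEMMAS AND PROOFS =====

theorem pyCombinations_eq_nil {α : Type} (xs : List α) (k : Nat) (h : xs.length < k) :
    pyCombinations xs k = [] := by
  induction xs generalizing k with
  | nil => cases k with
    | zero => omega
    | succ n => simp [pyCombinations]
  | cons x xs ih =>
    cases k with
    | zero => omega
    | succ n =>
      simp only [pyCombinations, List.append_eq_nil_iff, List.map_eq_nil_iff]
      exact ⟨ih n (by simp at h; omega), ih (n+1) (by simp at h; omega)⟩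

theorem length_of_mem_pyCombinations {α : Type} (xs : List α) (k : Nat) (c : List α)
    (h : c ∈ pyCombinations xs k) : c.length = k := by
  induction xs generalizing k c with
  | nil => cases k with
    | zero => simp [pyCombinations] at h; simp [h]
    | succ n => simp [pyCombinations] at h
  | cons x xs ih =>
    cases k with
    | zero => simp [pyCombinations] at h; simp [h]
    | succ n =>
      simp only [pyCombinations, List.mem_append, List.mem_map] at h
      rcases h with ⟨c', hc', rfl⟩ | h
      · simp [ih n c' hc']
      · exact ih (n+1) c h

theorem pyCombinations_map {α β : Type} (f : α → β) (xs : List α) (k : Nat) :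
    pyCombinations (xs.map f) k = (pyCombinations xs k).map (List.map f) := by
  induction xs generalizing k with
  | nil => cases k <;> simp [pyCombinations]
  | cons x xs ih =>
    cases k with
    | zero => simp [pyCombinations]
    | succ n => simp [pyCombinations, ih, List.map_map, Function.comp]

-- itertools' lexicographic order, characterised on an index range: first element, then the rest
theorem pyCombinations_range' (r s m : Nat) :
    pyCombinations (List.range' s m) (r + 1) =
      (List.range' s (m - r)).flatMap
        (fun i => (pyCombinations (List.range' (i + 1) (s + m - i - 1)) r).map (fun c => i :: c)) := by
  induction m generalizing s with
  | zero => simp [pyCombinations]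
  | succ m ih =>
    rw [List.range'_succ]
    by_cases hr : r ≤ m
    · have h1 : m + 1 - r = (m - r) + 1 := by omega
      rw [h1, List.range'_succ, List.flatMap_cons]
      have h3 : s + (m + 1) - s - 1 = m := by omega
      have h4 : ∀ i : Nat, (s + 1) + m - i - 1 = s + (m + 1) - i - 1 := by omega
      simp only [pyCombinations, ih (s+1), h3, h4]
    · have h1 : m + 1 - r = 0 := by omega
      rw [h1, List.range'_zero, List.flatMap_nil]
      simp only [pyCombinations]
      rw [pyCombinations_eq_nil _ r (by simp [List.length_range']; omega),
          pyCombinations_eq_nil _ (r+1) (by simp [List.length_range']; omega)]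
      simp

theorem flatMap_congr_mem {α β : Type} (l : List α) (f g : α → List β)
    (h : ∀ x ∈ l, f x = g x) : l.flatMap f = l.flatMap g := by
  induction l with
  | nil => rfl
  | cons x l ih => simp [List.flatMap_cons, h x (by simp), ih (fun y hy => h y (by simp [hy]))]

-- the DFS enumerates exactly the index combinations, in the same order
theorem altDfs_eq (chars : List Char) (n : Nat) (r : Nat) :
    ∀ (start : Nat) (idxs : List Nat), start ≤ n →
    altDfs chars n r start idxs =
      (pyCombinations (List.range' start (n - start)) r).map (fun c =>
        (String.mk ((idxs ++ c).map (fun i => chars.getD i ' ')),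
          (((idxs ++ c).getLastD 0 : Nat) : Int) - (((idxs ++ c).headD 0 : Nat) : Int))) := by
  induction r with
  | zero => intro start idxs h; simp [altDfs, pyCombinations]
  | succ r ih =>
    intro start idxs h
    rw [altDfs, pyCombinations_range', List.map_flatMap]
    have hcnt : n - start - r = n - r - start := by omega
    rw [hcnt]
    apply flatMap_congr_mem
    intro i hi
    rw [List.mem_range'_1] at hi
    have hin : i + 1 ≤ n := by omega
    have h5 : start + (n - start) - i - 1 = n - (i + 1) := by omega
    rw [h5, ih (i+1) (idxs ++ [i]) hin, List.map_map]
    apply List.map_congr_left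
    intro c _
    simp [List.append_assoc]

theorem map_range_getD {β γ : Type} (l : List β) (d : β) (f : β → γ) :
    (List.range l.length).map (fun i => f (l.getD i d)) = l.map f := by
  induction l with
  | nil => simp
  | cons x l ih =>
    simp only [List.length_cons, List.range_succ_eq_map, List.map_cons, List.map_map]
    simp only [List.getD_cons_zero, Function.comp_def, List.getD_cons_succ]
    exact congrArg _ ih

theorem getD_map_nil {α β : Type} (h : List α → List β) (hh : h [] = []) (C : List (List α)) (i : Nat) :
    (C.map h).getD i [] = h (C.getD i []) := by
  induction C generalizing i with
  | nil => simp [hh]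
  | cons c C ih => cases i <;> simp only [List.map_cons, List.getD_cons_zero, List.getD_cons_succ, ih]

theorem getD_map_ofNat (c : List Nat) (j : Nat) :
    (c.map (fun i : Nat => (i : Int))).getD j 0 = ((c.getD j 0 : Nat) : Int) := by
  induction c generalizing j with
  | nil => simp
  | cons x c ih => cases j <;> simp only [List.map_cons, List.getD_cons_zero, List.getD_cons_succ, ih]

theorem getD_last (c : List Nat) (d : Nat) (h : c ≠ []) :
    c.getD (c.length - 1) d = c.getLastD d := by
  induction c with
  | nil => simp at h
  | cons x c ih =>
    cases c with
    | nil => simp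
    | cons y t => simpa using ih (by simp)

-- A's per-length block (parallel indexing into the two combination lists) equals B's DFS at that length
theorem blockA_eq (chars : List Char) (k : Nat) (hk : 1 ≤ k) :
    (List.range (pyCombinations chars k).length).map (fun i =>
      (String.mk ((pyCombinations chars k).getD i []),
        ((pyCombinations (PySem.List.pyRange 0 (chars.length : Int) 1) k).getD i []).getD (k - 1) 0 -
        ((pyCombinations (PySem.List.pyRange 0 (chars.length : Int) 1) k).getD i []).getD 0 0))
    = altDfs chars chars.length k 0 [] := by
  have hchars : (List.range chars.length).map (fun i => chars.getD i ' ') = chars := by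
    simpa using map_range_getD chars ' ' id
  have h1 : pyCombinations chars k
      = (pyCombinations (List.range chars.length) k).map (List.map (fun i => chars.getD i ' ')) := by
    have := pyCombinations_map (fun i => chars.getD i ' ') (List.range chars.length) k
    rwa [hchars] at this
  have h2 : pyCombinations (PySem.List.pyRange 0 (chars.length : Int) 1) k
      = (pyCombinations (List.range chars.length) k).map (List.map (fun i : Nat => (i : Int))) := by
    rw [show PySem.List.pyRange 0 (chars.length : Int) 1
          = (List.range chars.length).map (fun i : Nat => (i : Int)) from PySem.List.pyRange_zero_nat _,
        pyCombinations_map]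
  set C := pyCombinations (List.range chars.length) k with hC
  rw [h1, h2, altDfs_eq chars chars.length k 0 [] (by omega)]
  rw [List.length_map]
  have hrange : List.range' 0 (chars.length - 0) = List.range chars.length := by
    rw [Nat.sub_zero, ← List.range_eq_range']
  rw [hrange, ← hC]
  have hstep : ∀ i : Nat,
      (String.mk (((C.map (List.map (fun i => chars.getD i ' '))).getD i []) ),
        ((C.map (List.map (fun i : Nat => (i : Int)))).getD i []).getD (k - 1) 0 -
        ((C.map (List.map (fun i : Nat => (i : Int)))).getD i []).getD 0 0)
      = (String.mk ((C.getD i []).map (fun i => chars.getD i ' ')),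
         (((C.getD i []).getD (k-1) 0 : Nat) : Int) - (((C.getD i []).getD 0 0 : Nat) : Int)) := by
    intro i
    rw [getD_map_nil _ (by simp), getD_map_nil _ (by simp), getD_map_ofNat, getD_map_ofNat]
  simp only [hstep]
  rw [map_range_getD C [] (fun c =>
      (String.mk (c.map (fun i => chars.getD i ' ')),
        ((c.getD (k-1) 0 : Nat) : Int) - ((c.getD 0 0 : Nat) : Int)))]
  apply List.map_congr_left
  intro c hc
  have hlen : c.length = k := length_of_mem_pyCombinations _ _ _ hc
  have hne : c ≠ [] := by intro h; rw [h] at hlen; simp at hlen; omega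
  simp only [List.nil_append]
  rw [show c.getD (k-1) 0 = c.getLastD 0 from by rw [← hlen]; exact getD_last c 0 hne]
  cases c with
  | nil => simp at hne
  | cons a t => simp

theorem main_eq (string : String) (length_max : Int) :
    find_all_subseqs string length_max = find_all_subseqs_alt string length_max := by
  simp only [find_all_subseqs, find_all_subseqs_alt]
  rw [PySem.List.foldl_append_eq_flatMap, List.nil_append]
  set chars := string.toList with hch
  set n := chars.length with hn
  by_cases hle : length_max ≤ (n : Int)
  · rw [min_eq_left hle]
    apply flatMap_congr_mem
    intro L hL
    rw [PySem.List.mem_pyRange_one] at hL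
    exact blockA_eq chars L.toNat (by omega)
  · rw [not_le] at hle
    rw [min_eq_right (le_of_lt hle)]
    rw [PySem.List.pyRange_one_append 1 ((n : Int) + 1) (length_max + 1) (by omega) (by omega),
        List.flatMap_append]
    have hz : (PySem.List.pyRange ((n : Int) + 1) (length_max + 1)).flatMap (fun length =>
        (List.range (pyCombinations chars length.toNat).length).map (fun i =>
          (String.mk ((pyCombinations chars length.toNat).getD i []),
            ((pyCombinations (PySem.List.pyRange 0 (n : Int) 1) length.toNat).getD i []).getD (length.toNat - 1) 0 -
            ((pyCombinations (PySem.List.pyRange 0 (n : Int) 1) length.toNat).getD i []).getD 0 0))) = [] := by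
      rw [List.flatMap_eq_nil_iff]
      intro L hL
      rw [PySem.List.mem_pyRange_one] at hL
      rw [pyCombinations_eq_nil chars L.toNat (by omega)]
      simp
    rw [hz, List.append_nil]
    apply flatMap_congr_mem
    intro L hL
    rw [PySem.List.mem_pyRange_one] at hL
    exact blockA_eq chars L.toNat (by omega)

-- ===== VERDICT (by name: the statement is the Claim_ definition above) =====
theorem find_all_subseqs_spec : Claim_equal_find_all_subseqs := by
  intro string length_max _
  unfold Spec_find_all_subseqs
  exact main_eq string length_max
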